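-- pv_equiv track=rewrite | github.com/ruiguo-bio/score_transformer | data_convert.py | remove_first_continue
-- ===== SOURCE A (Python) =====
-- def remove_first_continue(events):
--     in_first_bar = False
--     bar_count = 0
--     return_events = []
--     for event in events:
--         if event == 'bar':
--             if in_first_bar is False and bar_count == 0:
--                 in_first_bar = True
--                 bar_count += 1
--             else:
--                 in_first_bar = False
--         if event == 'continue':
--             if in_first_bar:
--                 continue
--         return_events.append(event)
--     return return_events
-- ===== SOURCE B (Python) =====
-- def remove_first_continue(events):
--     try:
--         i = events.index('bar')
--     except ValueError:
--         return list(events)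
--     rest = events[i + 1:]
--     try:
--         j = i + 1 + rest.index('bar')
--     except ValueError:
--         j = len(events)
--     return events[:i + 1] + [e for e in events[i + 1:j] if e != 'continue'] + events[j:]
-- ===== Notes on version B (the rewrite author's own statement) =====
-- stated objective: alternative
-- what changed: B replaces A's one-pass scan with a boolean in-first-bar flag by computing the indices of the first and second 'bar' up front and filtering 'continue' only from the slice strictly between them.
import Mathlib
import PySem

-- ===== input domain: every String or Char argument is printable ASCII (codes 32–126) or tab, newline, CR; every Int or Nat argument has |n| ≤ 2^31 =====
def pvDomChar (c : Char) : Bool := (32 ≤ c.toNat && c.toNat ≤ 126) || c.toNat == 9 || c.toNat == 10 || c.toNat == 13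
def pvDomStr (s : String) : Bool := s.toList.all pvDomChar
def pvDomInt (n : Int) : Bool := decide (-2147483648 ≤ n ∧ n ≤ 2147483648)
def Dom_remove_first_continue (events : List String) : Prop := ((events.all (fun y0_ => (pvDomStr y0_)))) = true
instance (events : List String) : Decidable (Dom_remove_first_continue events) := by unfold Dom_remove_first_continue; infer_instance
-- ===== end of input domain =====

-- B computes the first/second 'bar' boundaries first and filters 'continue' only
-- from the slice between them, instead of A's flag-threading single pass (objective: alternative).

-- ===== PORT A =====
-- A's loop over `events` threading (in_first_bar, bar_count), appending kept events;
-- ported as the obvious structural recursion over the same state.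
def removeFirstContinueGo (in_first_bar : Bool) (bar_count : Int) :
    List String → List String
  | [] => []
  | event :: rest =>
    let st : Bool × Int :=
      if event = "bar" then
        (if in_first_bar = false ∧ bar_count = 0 then (true, bar_count + 1)
         else (false, bar_count))
      else (in_first_bar, bar_count)
    if event = "continue" ∧ st.1 then removeFirstContinueGo st.1 st.2 rest
    else event :: removeFirstContinueGo st.1 st.2 rest

def remove_first_continue (events : List String) : List String :=
  removeFirstContinueGo false 0 events

-- ===== PORT B =====
def remove_first_continue_alt (events : List String) : List String :=
  match PySem.List.index? events "bar" with
  | none => events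
  | some i =>
    let rest := PySem.List.slice events (some ((i : Int) + 1)) none
    let j : Nat :=
      match PySem.List.index? rest "bar" with
      | some k => i + 1 + k
      | none => events.length
    PySem.List.slice events none (some ((i : Int) + 1))
      ++ (PySem.List.slice events (some ((i : Int) + 1)) (some (j : Int))).filter
          (fun e => e ≠ "continue")
      ++ PySem.List.slice events (some (j : Int)) none

-- ===== PRECONDITION & SPEC =====
def Spec_remove_first_continue (events : List String) (out : List String) : Prop := out = remove_first_continue_alt events
instance (events : List String) (out : List String) : Decidable (Spec_remove_first_continue events out) := by unfold Spec_remove_first_continue; infer_instance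

-- ===== CLAIM (what is proved, stated in full; the proofs are below) =====
def Claim_equal_remove_first_continue : Prop := ∀ (events : List String), Dom_remove_first_continue events → Spec_remove_first_continue events (remove_first_continue events)

-- ===== LEMMAS AND PROOFS =====

-- After the second 'bar' the state (false, 1) is absorbing and keeps everything.
theorem goA_false_one (r : List String) : removeFirstContinueGo false 1 r = r := by
  induction r with
  | nil => rfl
  | cons e rest ih =>
    simp only [removeFirstContinueGo]
    by_cases hb : e = "bar" <;> by_cases hc : e = "continue" <;> simp_all

-- Between the first and second 'bar' the pass filters 'continue', then copies.
def tailB (r : List String) : List String :=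
  match PySem.List.index? r "bar" with
  | none => r.filter (fun e => e ≠ "continue")
  | some k => (r.take k).filter (fun e => e ≠ "continue") ++ r.drop k

theorem goA_true_one (r : List String) : removeFirstContinueGo true 1 r = tailB r := by
  induction r with
  | nil => rfl
  | cons e rest ih =>
    by_cases hb : e = "bar"
    · subst hb
      simp only [removeFirstContinueGo, tailB, PySem.List.index?_cons_self]
      simp [goA_false_one]
    · have hidx : PySem.List.index? (e :: rest) "bar"
          = (PySem.List.index? rest "bar").map (· + 1) :=
        PySem.List.index?_cons_of_ne rest hb
      simp only [removeFirstContinueGo, if_neg hb]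
      cases h : PySem.List.index? rest "bar" with
      | none =>
        simp only [tailB, hidx, h, Option.map_none, ih]
        by_cases hc : e = "continue" <;> simp [hc]
      | some k =>
        simp only [tailB, hidx, h, Option.map_some, ih]
        by_cases hc : e = "continue" <;>
          simp [hc, List.take_succ_cons, List.drop_succ_cons]

-- B's port with the PySem slices reduced to plain take/drop.
theorem alt_norm (events : List String) :
    remove_first_continue_alt events =
    match PySem.List.index? events "bar" with
    | none => events
    | some i =>
      let j : Nat :=
        match PySem.List.index? (events.drop (i+1)) "bar" with
        | some k => i + 1 + k
        | none => events.length
      events.take (i+1) ++ ((events.drop (i+1)).take (j - (i+1))).filter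
          (fun e => e ≠ "continue") ++ events.drop j := by
  unfold remove_first_continue_alt
  cases h : PySem.List.index? events "bar" with
  | none => rfl
  | some i =>
    simp only []
    have hc : ((i : Int) + 1) = (((i+1 : Nat)) : Int) := by push_cast; ring
    rw [hc, PySem.List.slice_from_natCast, PySem.List.slice_to_natCast]
    cases h2 : PySem.List.index? (events.drop (i+1)) "bar" with
    | none =>
      simp only []
      rw [PySem.List.slice_natCast, PySem.List.slice_from_natCast]
    | some k =>
      simp only []
      rw [PySem.List.slice_natCast, PySem.List.slice_from_natCast]

theorem alt_cons_bar (rest : List String) :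
    remove_first_continue_alt ("bar" :: rest) = "bar" :: tailB rest := by
  rw [alt_norm]
  simp only [PySem.List.index?_cons_self]
  cases h : PySem.List.index? (("bar" :: rest).drop (0+1)) "bar" with
  | none =>
    have h2 : PySem.List.index? rest "bar" = none := by simpa using h
    simp only [tailB, h2]
    simp
  | some k =>
    have h2 : PySem.List.index? rest "bar" = some k := by simpa using h
    simp only [tailB, h2]
    simp [show 1 + k = k + 1 from Nat.add_comm 1 k]

theorem alt_cons_ne (e : String) (rest : List String) (hb : e ≠ "bar") :
    remove_first_continue_alt (e :: rest) = e :: remove_first_continue_alt rest := by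
  rw [alt_norm, alt_norm]
  have hidx : PySem.List.index? (e :: rest) "bar"
      = (PySem.List.index? rest "bar").map (· + 1) :=
    PySem.List.index?_cons_of_ne rest hb
  cases h : PySem.List.index? rest "bar" with
  | none =>
    have h1 : PySem.List.index? (e :: rest) "bar" = none := by rw [hidx, h]; rfl
    simp only [h1]
  | some i =>
    have h1 : PySem.List.index? (e :: rest) "bar" = some (i + 1) := by rw [hidx, h]; rfl
    simp only [h1]
    cases h2 : PySem.List.index? (rest.drop (i+1)) "bar" with
    | none =>
      have h3 : PySem.List.index? ((e :: rest).drop (i+1+1)) "bar" = none := by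
        simpa using h2
      simp only [h2, List.drop_succ_cons, List.take_succ_cons, List.length_cons,
        List.cons_append]
      rw [show rest.length + 1 - (i + 1 + 1) = rest.length - (i + 1) from by omega]
    | some k =>
      have h3 : PySem.List.index? ((e :: rest).drop (i+1+1)) "bar" = some k := by
        simpa using h2
      simp only [h3, List.take_succ_cons, List.cons_append]
      rw [show i + 1 + 1 + k = (i + 1 + k) + 1 from by omega, List.drop_succ_cons,
        show i + 1 + k + 1 - (i + 1 + 1) = k from by omega,
        show i + 1 + k - (i + 1) = k from by omega]
      rw [show i + 1 + k + 1 = (i + 1 + k) + 1 from rfl, List.drop_succ_cons]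

theorem rf_eq (events : List String) :
    remove_first_continue events = remove_first_continue_alt events := by
  induction events with
  | nil => rfl
  | cons e rest ih =>
    by_cases hb : e = "bar"
    · subst hb
      rw [alt_cons_bar]
      simp only [remove_first_continue, removeFirstContinueGo]
      simp [goA_true_one]
    · rw [alt_cons_ne e rest hb]
      simp only [remove_first_continue, removeFirstContinueGo] at *
      by_cases hc : e = "continue" <;> simp_all

-- ===== VERDICT (by name: the statement is the Claim_ definition above) =====
theorem remove_first_continue_spec : Claim_equal_remove_first_continue := by
  intro events _
  exact rf_eq events
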